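-- pv_equiv track=rewrite | github.com/hoi-danny/docs | .github/scripts/section_diff.py | section_for_line
-- ===== SOURCE A (Python) =====
-- from typing import Dict, Iterable, List, Optional, Tuple
--
-- def section_for_line(heading_lines: Dict[int, str], line_no: int) -> str:
--     if not heading_lines:
--         return "(no headings)"
--     prior = [ln for ln in heading_lines.keys() if ln <= line_no]
--     if not prior:
--         # before first heading
--         first_ln = min(heading_lines.keys())
--         return heading_lines[first_ln]
--     return heading_lines[max(prior)]
-- ===== SOURCE B (Python) =====
-- def section_for_line(heading_lines, line_no):
--     min_kv = None   # (smallest key seen, its value)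
--     best_kv = None  # (largest key <= line_no seen, its value)
--     for k, v in heading_lines.items():
--         if min_kv is None or k < min_kv[0]:
--             min_kv = (k, v)
--         if k <= line_no and (best_kv is None or best_kv[0] < k):
--             best_kv = (k, v)
--     if min_kv is None:
--         return "(no headings)"
--     return (best_kv if best_kv is not None else min_kv)[1]
-- ===== Notes on version B (the rewrite author's own statement) =====
-- stated objective: alternative
-- what changed: One fused scan over the items maintaining two accumulators (minimum-key pair and largest-key-<=-line_no pair) replaces A's filter comprehension plus separate min/max passes and dict lookups.
import Mathlib
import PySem

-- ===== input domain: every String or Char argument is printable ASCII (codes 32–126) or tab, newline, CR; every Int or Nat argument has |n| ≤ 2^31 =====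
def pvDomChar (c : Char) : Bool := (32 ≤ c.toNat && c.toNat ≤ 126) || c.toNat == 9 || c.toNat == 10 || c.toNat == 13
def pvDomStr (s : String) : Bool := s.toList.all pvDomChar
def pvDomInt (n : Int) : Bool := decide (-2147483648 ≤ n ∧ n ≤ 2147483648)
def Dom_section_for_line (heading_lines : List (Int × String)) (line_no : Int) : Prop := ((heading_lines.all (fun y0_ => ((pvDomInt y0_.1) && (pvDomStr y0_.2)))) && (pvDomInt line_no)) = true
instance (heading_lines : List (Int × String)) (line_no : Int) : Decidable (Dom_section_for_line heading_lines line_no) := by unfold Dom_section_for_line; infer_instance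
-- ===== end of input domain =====

-- B replaces A's filter+min/max passes and dict lookups by one fused scan with two accumulators (alternative decomposition, same cost).

-- ===== PORT A =====
-- literal transliteration of A: empty guard, 'prior' comprehension, min/max of keys, dict lookup
def section_for_line (heading_lines : List (Int × String)) (line_no : Int) : String :=
  if heading_lines = [] then "(no headings)"
  else
    let prior := (heading_lines.map Prod.fst).filter (fun ln => ln ≤ line_no)
    if prior = [] then
      match PySem.List.min? (heading_lines.map Prod.fst) (fun x => x) with
      | some first_ln => (List.lookup first_ln heading_lines).getD ""
      | none => ""
    else
      match PySem.List.max? prior (fun x => x) with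
      | some m => (List.lookup m heading_lines).getD ""
      | none => ""

-- ===== PORT B =====
-- accumulator updates of B's single loop
def sflMin (st : Option (Int × String)) (p : Int × String) : Option (Int × String) :=
  match st with
  | none => some p
  | some m => if p.1 < m.1 then some p else some m

def sflBest (line_no : Int) (st : Option (Int × String)) (p : Int × String) : Option (Int × String) :=
  if p.1 ≤ line_no then
    match st with
    | none => some p
    | some b => if b.1 < p.1 then some p else some b
  else st

def section_for_line_alt (heading_lines : List (Int × String)) (line_no : Int) : String :=
  let st := heading_lines.foldl (fun s p => (sflMin s.1 p, sflBest line_no s.2 p)) (none, none)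
  match st.1, st.2 with
  | none, _ => "(no headings)"
  | some _, some b => b.2
  | some m, none => m.2

-- ===== PRECONDITION & SPEC =====
def Spec_section_for_line (heading_lines : List (Int × String)) (line_no : Int) (out : String) : Prop := out = section_for_line_alt heading_lines line_no
instance (heading_lines : List (Int × String)) (line_no : Int) (out : String) : Decidable (Spec_section_for_line heading_lines line_no out) := by unfold Spec_section_for_line; infer_instance

-- ===== CLAIM (what is proved, stated in full; the proofs are below) =====
def Claim_equal_section_for_line : Prop := ∀ (heading_lines : List (Int × String)) (line_no : Int), Dom_section_for_line heading_lines line_no → Spec_section_for_line heading_lines line_no (section_for_line heading_lines line_no)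

-- ===== LEMMAS AND PROOFS =====

-- plain-pair variants of the accumulator updates (fold after the Option is seeded)
def sflG (m p : Int × String) : Int × String := if p.1 < m.1 then p else m
def sflH (line_no : Int) (q p : Int × String) : Int × String :=
  if p.1 ≤ line_no ∧ q.1 < p.1 then p else q

-- unfolding List.lookup one step for a pair-variable head
theorem lookup_cons_pv (a : Int) (p : Int × String) (l : List (Int × String)) :
    List.lookup a (p :: l) = if p.1 == a then some p.2 else List.lookup a l := by
  obtain ⟨k, v⟩ := p
  by_cases h : a = k
  · simp [List.lookup, h]
  · have h1 : (a == k) = false := by simpa using h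
    have h2 : (k == a) = false := by simpa using Ne.symm h
    simp [List.lookup, h1, h2]

theorem foldl_pair (line_no : Int) (t : List (Int × String)) (s : Option (Int × String) × Option (Int × String)) :
    t.foldl (fun s p => (sflMin s.1 p, sflBest line_no s.2 p)) s
      = (t.foldl sflMin s.1, t.foldl (sflBest line_no) s.2) := by
  induction t generalizing s with
  | nil => rfl
  | cons p t ih => simp [List.foldl, ih]

theorem foldl_sflMin_some (t : List (Int × String)) (m : Int × String) :
    t.foldl sflMin (some m) = some (t.foldl sflG m) := by
  induction t generalizing m with
  | nil => rfl
  | cons p t ih =>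
    simp only [List.foldl, sflMin, sflG]
    split_ifs <;> exact ih _

theorem foldl_sflBest_some (line_no : Int) (t : List (Int × String)) (q : Int × String) :
    t.foldl (sflBest line_no) (some q) = some (t.foldl (sflH line_no) q) := by
  induction t generalizing q with
  | nil => rfl
  | cons p t ih =>
    have hstep : sflBest line_no (some q) p = some (sflH line_no q p) := by
      unfold sflBest sflH
      by_cases h1 : p.1 ≤ line_no
      · by_cases h2 : q.1 < p.1 <;> simp [h1, h2]
      · rw [if_neg h1, if_neg (by omega)]
    rw [List.foldl, List.foldl, hstep]
    exact ih _

theorem sflG_fst (t : List (Int × String)) (m : Int × String) :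
    (t.foldl sflG m).1 = (t.map Prod.fst).foldl min m.1 := by
  induction t generalizing m with
  | nil => rfl
  | cons p t ih =>
    rw [List.map, List.foldl, List.foldl, ih]
    congr 1
    unfold sflG
    by_cases h : p.1 < m.1 <;> simp [h] <;> omega

theorem sflG_le (t : List (Int × String)) (m : Int × String) :
    (t.foldl sflG m).1 ≤ m.1 := by
  induction t generalizing m with
  | nil => exact le_refl _
  | cons p t ih =>
    rw [List.foldl]
    unfold sflG
    by_cases h : p.1 < m.1
    · simp only [h]
      exact le_trans (ih p) (le_of_lt h)
    · simpa [h] using ih m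

theorem sflG_lookup (t : List (Int × String)) (m : Int × String) :
    List.lookup (t.foldl sflG m).1 (m :: t) = some (t.foldl sflG m).2 := by
  induction t generalizing m with
  | nil => simp [lookup_cons_pv]
  | cons p t ih =>
    have hstep : (p :: t).foldl sflG m = t.foldl sflG (sflG m p) := rfl
    rw [hstep]
    by_cases hp : p.1 < m.1
    · have hg : sflG m p = p := by simp [sflG, hp]
      rw [hg]
      have hle : (t.foldl sflG p).1 ≤ p.1 := sflG_le t p
      have hne : (m.1 == (t.foldl sflG p).1) = false := by simp; omega
      rw [lookup_cons_pv]
      simp only [hne, Bool.false_eq_true, if_false]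
      exact ih p
    · have hg : sflG m p = m := by simp [sflG, hp]
      rw [hg]
      have hle : (t.foldl sflG m).1 ≤ m.1 := sflG_le t m
      have ihm := ih m
      rw [lookup_cons_pv] at ihm
      rw [lookup_cons_pv]
      by_cases he : m.1 = (t.foldl sflG m).1
      · have hb : (m.1 == (t.foldl sflG m).1) = true := by simpa using he
        simp only [hb, if_true] at ihm ⊢
        exact ihm
      · have hb : (m.1 == (t.foldl sflG m).1) = false := by simpa using he
        have hbp : (p.1 == (t.foldl sflG m).1) = false := by simp; omega
        simp only [hb, Bool.false_eq_true, if_false] at ihm ⊢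
        rw [lookup_cons_pv]
        simp only [hbp, Bool.false_eq_true, if_false]
        exact ihm

theorem sflH_fst (line_no : Int) (t : List (Int × String)) (q : Int × String) (hq : q.1 ≤ line_no) :
    (t.foldl (sflH line_no) q).1
      = (((t.map Prod.fst).filter (fun ln => ln ≤ line_no)).foldl max q.1) := by
  induction t generalizing q with
  | nil => rfl
  | cons p t ih =>
    rw [List.map, List.filter, List.foldl]
    by_cases h1 : p.1 ≤ line_no
    · simp only [h1, decide_true]
      rw [List.foldl]
      by_cases h2 : q.1 < p.1
      · have hs : sflH line_no q p = p := by simp [sflH, h1, h2]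
        rw [hs, ih p h1]
        congr 1
        omega
      · have hs : sflH line_no q p = q := by
          unfold sflH; rw [if_neg (by omega)]
        rw [hs, ih q hq]
        congr 1
        omega
    · simp only [h1, decide_false]
      have hs : sflH line_no q p = q := by
        unfold sflH; rw [if_neg (by omega)]
      rw [hs]
      exact ih q hq

theorem sflH_ge (line_no : Int) (t : List (Int × String)) (q : Int × String) :
    q.1 ≤ (t.foldl (sflH line_no) q).1 := by
  induction t generalizing q with
  | nil => exact le_refl _
  | cons p t ih =>
    rw [List.foldl]
    unfold sflH
    by_cases h : p.1 ≤ line_no ∧ q.1 < p.1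
    · simp only [h]
      exact le_trans (le_of_lt h.2) (ih p)
    · simpa [h] using ih q

theorem sflH_le (line_no : Int) (t : List (Int × String)) (q : Int × String) (hq : q.1 ≤ line_no) :
    (t.foldl (sflH line_no) q).1 ≤ line_no := by
  induction t generalizing q with
  | nil => exact hq
  | cons p t ih =>
    rw [List.foldl]
    unfold sflH
    by_cases h : p.1 ≤ line_no ∧ q.1 < p.1
    · simp only [h]
      exact ih p h.1
    · simpa [h] using ih q hq

theorem sflH_lookup (line_no : Int) (t : List (Int × String)) (q : Int × String) (hq : q.1 ≤ line_no) :
    List.lookup (t.foldl (sflH line_no) q).1 (q :: t) = some (t.foldl (sflH line_no) q).2 := by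
  induction t generalizing q with
  | nil => simp [lookup_cons_pv]
  | cons p t ih =>
    have hstep : (p :: t).foldl (sflH line_no) q = t.foldl (sflH line_no) (sflH line_no q p) := rfl
    rw [hstep]
    by_cases hp : p.1 ≤ line_no ∧ q.1 < p.1
    · have hg : sflH line_no q p = p := by simp [sflH, hp]
      rw [hg]
      have hge : p.1 ≤ (t.foldl (sflH line_no) p).1 := sflH_ge line_no t p
      have hq2 : q.1 < p.1 := hp.2
      have hne : (q.1 == (t.foldl (sflH line_no) p).1) = false := by simp; omega
      rw [lookup_cons_pv]
      simp only [hne, Bool.false_eq_true, if_false]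
      exact ih p hp.1
    · have hg : sflH line_no q p = q := by simp [sflH, hp]
      rw [hg]
      have hge : q.1 ≤ (t.foldl (sflH line_no) q).1 := sflH_ge line_no t q
      have hle : (t.foldl (sflH line_no) q).1 ≤ line_no := sflH_le line_no t q hq
      have ihq := ih q hq
      rw [lookup_cons_pv] at ihq
      rw [lookup_cons_pv]
      by_cases he : q.1 = (t.foldl (sflH line_no) q).1
      · have hb : (q.1 == (t.foldl (sflH line_no) q).1) = true := by simpa using he
        simp only [hb, if_true] at ihq ⊢
        exact ihq
      · have hb : (q.1 == (t.foldl (sflH line_no) q).1) = false := by simpa using he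
        have hbp : (p.1 == (t.foldl (sflH line_no) q).1) = false := by
          rcases not_and_or.mp hp with h | h
          · simp; omega
          · simp; omega
        simp only [hb, Bool.false_eq_true, if_false] at ihq ⊢
        rw [lookup_cons_pv]
        simp only [hbp, Bool.false_eq_true, if_false]
        exact ihq

-- behaviour of the best-accumulator fold seeded with none
theorem sflBest_none (line_no : Int) (t : List (Int × String)) :
    ((t.map Prod.fst).filter (fun ln => ln ≤ line_no) = [] ∧ t.foldl (sflBest line_no) none = none)
    ∨ (∃ x r, (t.map Prod.fst).filter (fun ln => ln ≤ line_no) = x :: r ∧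
        ∃ res, t.foldl (sflBest line_no) none = some res ∧
          res.1 = r.foldl max x ∧ res.1 ≤ line_no ∧ List.lookup res.1 t = some res.2) := by
  induction t with
  | nil => left; exact ⟨rfl, rfl⟩
  | cons p t ih =>
    by_cases h1 : p.1 ≤ line_no
    · right
      refine ⟨p.1, (t.map Prod.fst).filter (fun ln => ln ≤ line_no), by simp [h1], ?_⟩
      refine ⟨t.foldl (sflH line_no) p, ?_, ?_, ?_, ?_⟩
      · rw [List.foldl]
        have hs : sflBest line_no none p = some p := by simp [sflBest, h1]
        rw [hs]
        exact foldl_sflBest_some line_no t p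
      · exact sflH_fst line_no t p h1
      · exact sflH_le line_no t p h1
      · exact sflH_lookup line_no t p h1
    · have hfilter : ((p :: t).map Prod.fst).filter (fun ln => ln ≤ line_no)
          = (t.map Prod.fst).filter (fun ln => ln ≤ line_no) := by
        simp [h1]
      have hfold : (p :: t).foldl (sflBest line_no) none = t.foldl (sflBest line_no) none := by
        rw [List.foldl]
        have hs : sflBest line_no none p = none := by simp [sflBest, h1]
        rw [hs]
      rcases ih with ⟨he, hn⟩ | ⟨x, r, hf, res, hr, hmax, hle, hlk⟩
      · left; exact ⟨by rw [hfilter]; exact he, by rw [hfold]; exact hn⟩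
      · right
        refine ⟨x, r, by rw [hfilter]; exact hf, res, by rw [hfold]; exact hr, hmax, hle, ?_⟩
        have hne : (p.1 == res.1) = false := by simp; omega
        rw [lookup_cons_pv]
        simp only [hne, Bool.false_eq_true, if_false]
        exact hlk

-- ===== VERDICT (by name: the statement is the Claim_ definition above) =====
theorem section_for_line_spec : Claim_equal_section_for_line := by
  intro hl line_no _
  unfold Spec_section_for_line
  cases hl with
  | nil => rfl
  | cons p0 t =>
    unfold section_for_line section_for_line_alt
    simp only [List.foldl, foldl_pair, reduceCtorEq, if_false]
    by_cases hp0 : p0.1 ≤ line_no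
    · -- head qualifies: prior is nonempty, best accumulator is seeded by p0
      have hbest : t.foldl (sflBest line_no) (sflBest line_no none p0)
          = some (t.foldl (sflH line_no) p0) := by
        have hs : sflBest line_no none p0 = some p0 := by simp [sflBest, hp0]
        rw [hs]
        exact foldl_sflBest_some line_no t p0
      have hmin : t.foldl sflMin (sflMin none p0) = some (t.foldl sflG p0) := by
        have hs : sflMin none p0 = some p0 := rfl
        rw [hs]
        exact foldl_sflMin_some t p0
      have hprior : ((p0 :: t).map Prod.fst).filter (fun ln => ln ≤ line_no)
          = p0.1 :: (t.map Prod.fst).filter (fun ln => ln ≤ line_no) := by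
        simp [hp0]
      rw [hprior]
      simp only [reduceCtorEq, if_false, PySem.List.max?_id_cons, hbest, hmin]
      rw [← sflH_fst line_no t p0 hp0, sflH_lookup line_no t p0 hp0]
      rfl
    · -- head does not qualify
      have hprior : ((p0 :: t).map Prod.fst).filter (fun ln => ln ≤ line_no)
          = (t.map Prod.fst).filter (fun ln => ln ≤ line_no) := by
        simp [hp0]
      have hbest0 : sflBest line_no none p0 = none := by simp [sflBest, hp0]
      have hmin : t.foldl sflMin (sflMin none p0) = some (t.foldl sflG p0) := by
        exact foldl_sflMin_some t p0
      rw [hprior, hbest0, hmin]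
      rcases sflBest_none line_no t with ⟨he, hn⟩ | ⟨x, r, hf, res, hr, hmax, hle, hlk⟩
      · -- no key ≤ line_no anywhere: fall back to the minimum-key value
        rw [he, hn]
        simp only [List.map_cons, PySem.List.min?_id_cons, reduceIte]
        rw [← sflG_fst t p0, sflG_lookup t p0]
        rfl
      · rw [hf, hr]
        simp only [reduceCtorEq, if_false, PySem.List.max?_id_cons, ← hmax]
        have hne : (p0.1 == res.1) = false := by simp; omega
        rw [lookup_cons_pv]
        simp only [hne, Bool.false_eq_true, if_false, hlk]
        rfl
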